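-- pv_equiv track=rewrite | github.com/7ywx/leetcode | test.py | min_switches
-- ===== SOURCE A (Python) =====
-- def min_switches(initial, target):
--     n = len(initial)
--     switches = 0
--
--     for i in range(n):
--         # 如果当前灯泡的状态与目标状态不同
--         if initial[i] != target[i]:
--             # 计算需要切换多少次
--             diff = (target[i] - initial[i]) % 3
--             # 切换当前灯泡及其子树
--             for j in range(i, n):
--                 # 对当前灯泡及其子树进行切换
--                 initial[j] = (initial[j] + diff) % 3
--             # 记录切换次数
--             switches += 1
--
--     return switches
-- ===== SOURCE B (Python) =====
-- def min_switches(initial, target):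
--     # One pass: carry the cumulative mod-3 offset applied to the rest of the
--     # array instead of rewriting the suffix on every switch.
--     # Note: unlike A, this does not mutate `initial`.
--     count = 0
--     off = 0
--     switched = False
--     for x, t in zip(initial, target):
--         cur = (x + off) % 3 if switched else x
--         if cur != t:
--             off = (off + (t - cur)) % 3
--             switched = True
--             count += 1
--     return count
-- ===== Notes on version B (the rewrite author's own statement) =====
-- stated objective: faster
-- what changed: Replaces A's suffix-rewriting inner loop with a single pass that carries the cumulative mod-3 offset applied to the remaining elements (and does not mutate the input list).
import Mathlib
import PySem

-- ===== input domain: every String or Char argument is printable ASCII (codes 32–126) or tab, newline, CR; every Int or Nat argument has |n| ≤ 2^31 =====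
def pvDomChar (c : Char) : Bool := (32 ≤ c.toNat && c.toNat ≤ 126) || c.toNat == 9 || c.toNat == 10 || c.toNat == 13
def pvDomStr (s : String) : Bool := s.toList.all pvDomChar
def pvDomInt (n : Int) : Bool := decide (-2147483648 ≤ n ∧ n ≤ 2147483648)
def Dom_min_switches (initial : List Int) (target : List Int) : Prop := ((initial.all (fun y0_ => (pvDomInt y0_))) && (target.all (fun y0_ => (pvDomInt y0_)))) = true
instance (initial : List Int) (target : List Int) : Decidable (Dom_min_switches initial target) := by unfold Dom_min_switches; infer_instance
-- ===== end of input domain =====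

-- B replaces A's suffix-rewriting inner loop by one pass with a running mod-3 offset (faster);
-- A mutates `initial` in place, B does not: the equivalence proved here is about the RETURN value only.

-- ===== PORT A =====
-- Outer `for i in range(n)` as structural recursion over the (remaining) list paired with target;
-- the inner `for j in range(i, n): initial[j] = (initial[j] + diff) % 3` is the map over the
-- remaining suffix (element i itself is updated too but never read again, so it is consumed here).
def msA_loop (xs : List Int) (ts : List Int) (switches : Int) : Int :=
  match xs, ts with
  | [], _ => switches
  | _ :: _, [] => switches   -- Python raises IndexError here; excluded by Pre_min_switches
  | x :: xs', t :: ts' =>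
    if x ≠ t then
      let diff := PySem.Int.mod (t - x) 3
      msA_loop (xs'.map (fun y => PySem.Int.mod (y + diff) 3)) ts' (switches + 1)
    else
      msA_loop xs' ts' switches

def min_switches (initial : List Int) (target : List Int) : Int :=
  msA_loop initial target 0

-- ===== PORT B =====
-- for x, t in zip(initial, target) with state (count, off, switched)
def msB_loop (ps : List (Int × Int)) (count : Int) (off : Int) (switched : Bool) : Int :=
  match ps with
  | [] => count
  | (x, t) :: rest =>
    let cur := if switched then PySem.Int.mod (x + off) 3 else x
    if cur ≠ t then
      msB_loop rest (count + 1) (PySem.Int.mod (off + (t - cur)) 3) true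
    else
      msB_loop rest count off switched

def min_switches_alt (initial : List Int) (target : List Int) : Int :=
  msB_loop (initial.zip target) 0 0 false

-- ===== PRECONDITION & SPEC =====
-- Pre_ excludes exactly the inputs where A raises IndexError (target shorter than initial).
def Pre_min_switches (initial : List Int) (target : List Int) : Prop :=
  initial.length ≤ target.length
instance (initial : List Int) (target : List Int) : Decidable (Pre_min_switches initial target) := by unfold Pre_min_switches; infer_instance

def pvWitness_min_switches : List Int × List Int := ([0, 2, 1], [1, 1, 1])

def Spec_min_switches (initial : List Int) (target : List Int) (out : Int) : Prop := out = min_switches_alt initial target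
instance (initial : List Int) (target : List Int) (out : Int) : Decidable (Spec_min_switches initial target out) := by unfold Spec_min_switches; infer_instance

-- ===== CLAIM (what is proved, stated in full; the proofs are below) =====
def Claim_equal_min_switches : Prop := ∀ (initial : List Int) (target : List Int), Dom_min_switches initial target → Pre_min_switches initial target → Spec_min_switches initial target (min_switches initial target)

-- ===== LEMMAS AND PROOFS =====

-- Python's % with positive divisor is Int.emod.
theorem msMod_eq (a : Int) : PySem.Int.mod a 3 = a % 3 :=
  PySem.Int.mod_eq_emod_of_pos (by norm_num)

-- offset absorption: applying diff on top of an already-offset value is one combined offset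
theorem mod3_absorb (y off d : Int) :
    ((y + off) % 3 + d % 3) % 3 = (y + (off + d) % 3) % 3 := by
  conv_rhs => rw [Int.add_emod, Int.emod_emod_of_dvd _ (dvd_refl 3), ← Int.add_emod]
  conv_lhs => rw [Int.add_emod, Int.emod_emod_of_dvd _ (dvd_refl 3),
                  Int.emod_emod_of_dvd _ (dvd_refl 3), ← Int.add_emod]
  ring_nf

-- switched phase: A's suffix, shifted by `off`, is tracked by B's offset state
theorem phase1 (xs : List Int) : ∀ (ts : List Int) (s off : Int),
    msA_loop (xs.map (fun y => (y + off) % 3)) ts s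
      = msB_loop (xs.zip ts) s off true := by
  induction xs with
  | nil => intro ts s off; cases ts <;> simp [msA_loop, msB_loop]
  | cons x xs ih =>
    intro ts s off
    cases ts with
    | nil => simp [msA_loop, msB_loop]
    | cons t ts =>
      simp only [List.map_cons, List.zip_cons_cons, msA_loop, msB_loop, msMod_eq, List.map_map]
      split_ifs with h
      case neg => exact ih ts s off
      · rw [← ih ts (s + 1) ((off + (t - (x + off) % 3)) % 3)]
        congr 1
        apply List.map_congr_left
        intro y _
        simp only [Function.comp_apply]
        exact mod3_absorb y off (t - (x + off) % 3)

-- unswitched phase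
theorem phase0 (xs : List Int) : ∀ (ts : List Int) (s : Int),
    msA_loop xs ts s = msB_loop (xs.zip ts) s 0 false := by
  induction xs with
  | nil => intro ts s; cases ts <;> simp [msA_loop, msB_loop]
  | cons x xs ih =>
    intro ts s
    cases ts with
    | nil => simp [msA_loop, msB_loop]
    | cons t ts =>
      by_cases h : x = t
      · simpa [msA_loop, msB_loop, h] using ih ts s
      · simp only [List.zip_cons_cons]
        simp [msA_loop, msB_loop, h]
        rw [show (fun y : Int => (y + (t - x)) % 3)
              = (fun y => (y + (t - x) % 3) % 3) from by
            funext y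
            conv_rhs => rw [Int.add_emod, Int.emod_emod_of_dvd _ (dvd_refl 3), ← Int.add_emod]]
        exact phase1 xs ts (s + 1) ((t - x) % 3)

-- ===== VERDICT (by name: the statement is the Claim_ definition above) =====
theorem min_switches_spec : Claim_equal_min_switches := by
  intro initial target _ _
  unfold Spec_min_switches min_switches min_switches_alt
  exact phase0 initial target 0
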